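-- pv_equiv track=rewrite | github.com/Deathcharge/helix-hub-agents | src/helix_orchestration/coordination/surya_core.py | _derive_implications
-- ===== SOURCE A (Python) =====
-- def _derive_implications(patterns: list[str], connections: list[str]) -> list[str]:
--     """Derive implications from patterns and connections."""
--     implications = []
--
--     if any("causal" in p for p in patterns):
--         implications.append("future outcomes may be predictable from this chain")
--
--     if any("growth" in c for c in connections):
--         implications.append("continued development is likely if current conditions persist")
--
--     if any("conflict" in c for c in connections):
--         implications.append("resolution or escalation is needed")
--
--     if any("transformation" in c for c in connections):
--         implications.append("fundamental change is in process")
--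
--     if not implications:
--         implications.append("situation appears stable - monitor for changes")
--
--     return implications
-- ===== SOURCE B (Python) =====
-- def _derive_implications(patterns: list[str], connections: list[str]) -> list[str]:
--     """Single pass over connections builds a set of found trigger keywords;
--     implications are then emitted from a fixed table by membership tests."""
--     keywords = ("growth", "conflict", "transformation")
--     found = set()
--     for c in connections:
--         for kw in keywords:
--             if kw in c:
--                 found.add(kw)
--     causal = any("causal" in p for p in patterns)
--     out = ["future outcomes may be predictable from this chain"] if causal else []
--     for kw, msg in (
--         ("growth", "continued development is likely if current conditions persist"),
--         ("conflict", "resolution or escalation is needed"),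
--         ("transformation", "fundamental change is in process"),
--     ):
--         if kw in found:
--             out.append(msg)
--     return out if out else ["situation appears stable - monitor for changes"]
-- ===== Notes on version B (the rewrite author's own statement) =====
-- stated objective: alternative
-- what changed: Replaces three separate any-scans over connections with one indexing pass that builds a set of found trigger keywords, then emits the fixed implication strings from a table by constant-time membership tests.
import Mathlib
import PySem

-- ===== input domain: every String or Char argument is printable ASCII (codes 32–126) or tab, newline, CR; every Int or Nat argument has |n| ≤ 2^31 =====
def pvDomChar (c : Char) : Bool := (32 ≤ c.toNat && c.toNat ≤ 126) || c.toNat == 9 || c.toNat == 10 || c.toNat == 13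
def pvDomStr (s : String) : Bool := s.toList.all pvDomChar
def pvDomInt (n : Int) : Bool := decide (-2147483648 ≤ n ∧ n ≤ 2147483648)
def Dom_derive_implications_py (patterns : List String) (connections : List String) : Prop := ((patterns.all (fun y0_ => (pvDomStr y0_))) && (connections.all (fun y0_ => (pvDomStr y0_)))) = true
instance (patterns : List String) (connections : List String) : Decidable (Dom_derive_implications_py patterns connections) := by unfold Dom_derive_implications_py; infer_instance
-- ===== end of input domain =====

-- B replaces three separate any-scans over connections by one keyword-indexing pass
-- into a set, then emits the fixed strings from a table by membership tests (alternative structure, same cost).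


-- ===== PORT A =====
def derive_implications_py (patterns : List String) (connections : List String) : List String :=
  let implications : List String := []
  let implications := if patterns.any (fun p => PySem.Str.isIn "causal" p) then
      implications ++ ["future outcomes may be predictable from this chain"] else implications
  let implications := if connections.any (fun c => PySem.Str.isIn "growth" c) then
      implications ++ ["continued development is likely if current conditions persist"] else implications
  let implications := if connections.any (fun c => PySem.Str.isIn "conflict" c) then
      implications ++ ["resolution or escalation is needed"] else implications
  let implications := if connections.any (fun c => PySem.Str.isIn "transformation" c) then
      implications ++ ["fundamental change is in process"] else implications
  let implications := if implications.isEmpty then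
      implications ++ ["situation appears stable - monitor for changes"] else implications
  implications

-- ===== PORT B =====
def dip_keywords : List String := ["growth", "conflict", "transformation"]

def dip_messages : List (String × String) :=
  [("growth", "continued development is likely if current conditions persist"),
   ("conflict", "resolution or escalation is needed"),
   ("transformation", "fundamental change is in process")]

def derive_implications_py_alt (patterns : List String) (connections : List String) : List String :=
  let found : PySem.Set String :=
    connections.foldl
      (fun s c => dip_keywords.foldl (fun s kw => if PySem.Str.isIn kw c then PySem.Set.add s kw else s) s)
      PySem.Set.empty
  let causal := patterns.any (fun p => PySem.Str.isIn "causal" p)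
  let out : List String := if causal then ["future outcomes may be predictable from this chain"] else []
  let out := dip_messages.foldl
      (fun out p => if PySem.Set.contains found p.1 then out ++ [p.2] else out) out
  if out.isEmpty then ["situation appears stable - monitor for changes"] else out

-- ===== PRECONDITION & SPEC =====
def Spec_derive_implications_py (patterns : List String) (connections : List String) (out : List String) : Prop := out = derive_implications_py_alt patterns connections
instance (patterns : List String) (connections : List String) (out : List String) : Decidable (Spec_derive_implications_py patterns connections out) := by unfold Spec_derive_implications_py; infer_instance

-- ===== CLAIM (what is proved, stated in full; the proofs are below) =====
def Claim_equal_derive_implications_py : Prop := ∀ (patterns : List String) (connections : List String), Dom_derive_implications_py patterns connections → Spec_derive_implications_py patterns connections (derive_implications_py patterns connections)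

-- ===== LEMMAS AND PROOFS =====

-- membership in the inner (per-connection) keyword fold, for each concrete keyword
theorem mem_inner_kw (kw : String) (hkw : kw ∈ dip_keywords) (s : PySem.Set String) (c : String) :
    kw ∈ dip_keywords.foldl (fun s k => if PySem.Str.isIn k c then PySem.Set.add s k else s) s ↔
      kw ∈ s ∨ PySem.Str.isIn kw c = true := by
  simp only [dip_keywords, List.mem_cons, List.not_mem_nil, or_false] at hkw
  simp only [dip_keywords, List.foldl]
  rcases hkw with h | h | h <;> subst h <;>
    split_ifs with h1 h2 h3 <;> simp_all [PySem.Set.mem_add]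

-- membership in the outer fold over connections
theorem mem_found (kw : String) (hkw : kw ∈ dip_keywords) (connections : List String) :
    ∀ s : PySem.Set String,
      kw ∈ connections.foldl
        (fun s c => dip_keywords.foldl (fun s k => if PySem.Str.isIn k c then PySem.Set.add s k else s) s) s ↔
      kw ∈ s ∨ connections.any (fun c => PySem.Str.isIn kw c) = true := by
  induction connections with
  | nil => simp
  | cons c cs ih =>
    intro s
    simp only [List.foldl, List.any_cons, ih, mem_inner_kw kw hkw]
    simp only [Bool.or_eq_true]
    tauto

theorem derive_implications_py_spec : Claim_equal_derive_implications_py := by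
  intro patterns connections _
  unfold Spec_derive_implications_py derive_implications_py derive_implications_py_alt
  have hg := (mem_found "growth" (by simp [dip_keywords]) connections PySem.Set.empty).trans
    (or_iff_right (by simp [PySem.Set.empty]))
  have hc := (mem_found "conflict" (by simp [dip_keywords]) connections PySem.Set.empty).trans
    (or_iff_right (by simp [PySem.Set.empty]))
  have ht := (mem_found "transformation" (by simp [dip_keywords]) connections PySem.Set.empty).trans
    (or_iff_right (by simp [PySem.Set.empty]))
  simp only [dip_messages, List.foldl, PySem.Set.contains_eq_listContains,
    List.contains_iff_mem]
  simp only [hg, hc, ht]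
  cases h1 : patterns.any (fun p => PySem.Str.isIn "causal" p) <;>
  cases h2 : connections.any (fun c => PySem.Str.isIn "growth" c) <;>
  cases h3 : connections.any (fun c => PySem.Str.isIn "conflict" c) <;>
  cases h4 : connections.any (fun c => PySem.Str.isIn "transformation" c) <;>
    simp only [h1, h2, h3, h4, if_true, if_false, Bool.false_eq_true, List.nil_append,
      List.append_nil, List.isEmpty_nil, List.isEmpty_cons, List.append_assoc] <;> rfl
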